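-- pv_equiv track=rewrite | github.com/sapoclay/auditorria | audittorria/interfaz.py | _separar_documentacion_en_pestanas
-- ===== SOURCE A (Python) =====
-- def _separar_documentacion_en_pestanas(texto: str) -> list[tuple[str, str]]:
--     """Divide la documentación en pestañas usando los encabezados markdown de segundo nivel."""
--     titulo_actual = "General"
--     lineas_actuales: list[str] = []
--     secciones: list[tuple[str, str]] = []
--
--     for linea in texto.splitlines():
--         if linea.startswith("# "):
--             continue
--         if linea.startswith("## "):
--             contenido_actual = "\n".join(lineas_actuales).strip()
--             if contenido_actual:
--                 secciones.append((titulo_actual, contenido_actual))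
--             titulo_actual = linea[3:].strip()
--             lineas_actuales = []
--             continue
--         if linea.startswith("### "):
--             lineas_actuales.append(linea[4:].strip().upper())
--             continue
--
--         if not lineas_actuales and not linea.strip():
--             continue
--         lineas_actuales.append(linea)
--
--     contenido_actual = "\n".join(lineas_actuales).strip()
--     if contenido_actual:
--         secciones.append((titulo_actual, contenido_actual))
--
--     return [(titulo, contenido if contenido else "Sin contenido") for titulo, contenido in secciones]
-- ===== SOURCE B (Python) =====
-- def _separar_documentacion_en_pestanas(texto: str) -> list[tuple[str, str]]:
--     """Two-pass version: first partition lines into raw sections, then format each."""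
--     # Pass 1: partition into (title, raw lines), '## ' starts a new section, '# ' lines dropped.
--     secciones_crudas: list[tuple[str, list[str]]] = []
--     titulo = "General"
--     crudas: list[str] = []
--     for linea in texto.splitlines():
--         if linea.startswith("# "):
--             continue
--         if linea.startswith("## "):
--             secciones_crudas.append((titulo, crudas))
--             titulo = linea[3:].strip()
--             crudas = []
--         else:
--             crudas.append(linea)
--     secciones_crudas.append((titulo, crudas))
--
--     # Pass 2: format each section's raw lines and keep the non-empty ones.
--     secciones: list[tuple[str, str]] = []
--     for t, lineas in secciones_crudas:
--         contenido_lineas: list[str] = []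
--         for linea in lineas:
--             if linea.startswith("### "):
--                 contenido_lineas.append(linea[4:].strip().upper())
--             elif contenido_lineas or linea.strip():
--                 contenido_lineas.append(linea)
--         contenido = "\n".join(contenido_lineas).strip()
--         if contenido:
--             secciones.append((t, contenido))
--
--     return [(t, c if c else "Sin contenido") for t, c in secciones]
-- ===== Notes on version B (the rewrite author's own statement) =====
-- stated objective: alternative
-- what changed: Replaces A's single-pass state machine (title, accumulator and section list juggled together) by two passes: first partition the lines into raw sections at second-level markdown headers, then format each section's raw lines independently and keep the non-empty ones.
import Mathlib
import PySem

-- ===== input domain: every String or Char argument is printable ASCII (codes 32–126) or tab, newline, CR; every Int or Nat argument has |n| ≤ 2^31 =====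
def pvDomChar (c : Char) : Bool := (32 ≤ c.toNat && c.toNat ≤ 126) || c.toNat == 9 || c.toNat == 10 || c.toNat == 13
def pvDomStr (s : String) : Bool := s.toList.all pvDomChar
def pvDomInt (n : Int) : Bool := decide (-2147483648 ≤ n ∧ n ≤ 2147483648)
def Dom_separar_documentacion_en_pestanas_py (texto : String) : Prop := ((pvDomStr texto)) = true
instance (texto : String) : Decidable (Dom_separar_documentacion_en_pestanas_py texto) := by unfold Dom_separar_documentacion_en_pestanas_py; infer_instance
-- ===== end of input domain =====

-- B replaces A's single-pass state machine with a two-pass decomposition (partition into raw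
-- sections, then format each section independently); same cost, clearer structure.

-- ===== PORT A =====
-- A's loop: state (titulo_actual, lineas_actuales, secciones), recursing over the lines.
def sepA_go : List String → String → List String → List (String × String) → List (String × String)
  | [], t, acc, secs =>
      let c := PySem.Str.strip (PySem.Str.join "\n" acc)
      if c ≠ "" then secs ++ [(t, c)] else secs
  | l :: ls, t, acc, secs =>
      if PySem.Str.startswith l "# " then sepA_go ls t acc secs
      else if PySem.Str.startswith l "## " then
        let c := PySem.Str.strip (PySem.Str.join "\n" acc)
        sepA_go ls (PySem.Str.strip (PySem.Str.slice l (some 3) none)) []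
          (if c ≠ "" then secs ++ [(t, c)] else secs)
      else if PySem.Str.startswith l "### " then
        sepA_go ls t (acc ++ [PySem.Str.upper (PySem.Str.strip (PySem.Str.slice l (some 4) none))]) secs
      else if acc = [] ∧ PySem.Str.strip l = "" then sepA_go ls t acc secs
      else sepA_go ls t (acc ++ [l]) secs

def separar_documentacion_en_pestanas_py (texto : String) : List (String × String) :=
  (sepA_go (PySem.Str.splitlines texto) "General" [] []).map
    (fun p => (p.1, if p.2 ≠ "" then p.2 else "Sin contenido"))

-- ===== PORT B =====
-- Pass 1: partition the lines into raw sections; '## ' starts a new section, '# ' lines dropped.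
def sepB_part : List String → String → List String → List (String × List String) → List (String × List String)
  | [], t, cur, done => done ++ [(t, cur)]
  | l :: ls, t, cur, done =>
      if PySem.Str.startswith l "# " then sepB_part ls t cur done
      else if PySem.Str.startswith l "## " then
        sepB_part ls (PySem.Str.strip (PySem.Str.slice l (some 3) none)) [] (done ++ [(t, cur)])
      else sepB_part ls t (cur ++ [l]) done

-- Pass 2 inner loop: format one section's raw lines.
def sepB_fmt : List String → List String → List String
  | acc, [] => acc
  | acc, l :: ls =>
      if PySem.Str.startswith l "### " then
        sepB_fmt (acc ++ [PySem.Str.upper (PySem.Str.strip (PySem.Str.slice l (some 4) none))]) ls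
      else if acc ≠ [] ∨ PySem.Str.strip l ≠ "" then sepB_fmt (acc ++ [l]) ls
      else sepB_fmt acc ls

-- Pass 2: keep the sections with non-empty formatted content.
def sepB_step (out : List (String × String)) (sec : String × List String) : List (String × String) :=
  let c := PySem.Str.strip (PySem.Str.join "\n" (sepB_fmt [] sec.2))
  if c ≠ "" then out ++ [(sec.1, c)] else out

def separar_documentacion_en_pestanas_py_alt (texto : String) : List (String × String) :=
  ((sepB_part (PySem.Str.splitlines texto) "General" [] []).foldl sepB_step []).map
    (fun p => (p.1, if p.2 ≠ "" then p.2 else "Sin contenido"))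

-- ===== PRECONDITION & SPEC =====
def Spec_separar_documentacion_en_pestanas_py (texto : String) (out : List (String × String)) : Prop := out = separar_documentacion_en_pestanas_py_alt texto
instance (texto : String) (out : List (String × String)) : Decidable (Spec_separar_documentacion_en_pestanas_py texto out) := by unfold Spec_separar_documentacion_en_pestanas_py; infer_instance

-- ===== CLAIM (what is proved, stated in full; the proofs are below) =====
def Claim_equal_separar_documentacion_en_pestanas_py : Prop := ∀ (texto : String), Dom_separar_documentacion_en_pestanas_py texto → Spec_separar_documentacion_en_pestanas_py texto (separar_documentacion_en_pestanas_py texto)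

-- ===== LEMMAS AND PROOFS =====

-- the formatter is a left fold: formatting xs ++ ys continues from the state after xs
theorem sepB_fmt_append (xs : List String) (ys acc : List String) :
    sepB_fmt acc (xs ++ ys) = sepB_fmt (sepB_fmt acc xs) ys := by
  induction xs generalizing acc with
  | nil => rfl
  | cons l xs ih =>
      simp only [List.cons_append, sepB_fmt]
      split_ifs <;> exact ih _

-- one formatter step, as an explicit if-cascade
theorem sepB_fmt_singleton (acc : List String) (l : String) :
    sepB_fmt acc [l]
      = if PySem.Str.startswith l "### " then
          acc ++ [PySem.Str.upper (PySem.Str.strip (PySem.Str.slice l (some 4) none))]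
        else if acc ≠ [] ∨ PySem.Str.strip l ≠ "" then acc ++ [l] else acc := by
  simp only [sepB_fmt]

-- pass 1's 'done' accumulator only prepends
theorem sepB_part_acc (ls : List String) (t : String) (cur : List String)
    (done : List (String × List String)) :
    sepB_part ls t cur done = done ++ sepB_part ls t cur [] := by
  induction ls generalizing t cur done with
  | nil => simp [sepB_part]
  | cons l ls ih =>
      simp only [sepB_part]
      split_ifs
      · exact ih _ _ _
      · rw [ih _ _ (done ++ _), ih _ _ ([] ++ _)]; simp
      · exact ih _ _ _

-- pass 2's 'out' accumulator only prepends
theorem sepB_fold_acc (secs : List (String × List String)) (out : List (String × String)) :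
    secs.foldl sepB_step out = out ++ secs.foldl sepB_step [] := by
  induction secs generalizing out with
  | nil => simp
  | cons s secs ih =>
      simp only [List.foldl_cons]
      rw [ih (sepB_step out s), ih (sepB_step [] s)]
      simp only [sepB_step]
      split_ifs <;> simp

-- main invariant: A's loop, run with accumulator 'formatted raw', yields B's two passes
theorem sepA_go_eq (ls : List String) (t : String) (raw : List String)
    (secs : List (String × String)) :
    sepA_go ls t (sepB_fmt [] raw) secs
      = secs ++ (sepB_part ls t raw []).foldl sepB_step [] := by
  induction ls generalizing t raw secs with
  | nil =>
      simp only [sepA_go, sepB_part, List.nil_append, List.foldl_cons, List.foldl_nil, sepB_step]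
      split_ifs <;> simp
  | cons l ls ih =>
      by_cases h1 : PySem.Str.startswith l "# " = true
      · simp only [sepA_go, sepB_part, if_pos h1]
        exact ih t raw secs
      · by_cases h2 : PySem.Str.startswith l "## " = true
        · simp only [sepA_go, sepB_part, if_neg h1, if_pos h2]
          have hB := ih (PySem.Str.strip (PySem.Str.slice l (some 3) none)) []
            (if PySem.Str.strip (PySem.Str.join "\n" (sepB_fmt [] raw)) ≠ "" then
              secs ++ [(t, PySem.Str.strip (PySem.Str.join "\n" (sepB_fmt [] raw)))] else secs)
          simp only [sepB_fmt] at hB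
          rw [hB,
            sepB_part_acc ls (PySem.Str.strip (PySem.Str.slice l (some 3) none)) []
              ([] ++ [(t, raw)]),
            List.foldl_append,
            sepB_fold_acc (sepB_part ls (PySem.Str.strip (PySem.Str.slice l (some 3) none)) [] [])
              (List.foldl sepB_step [] ([] ++ [(t, raw)]))]
          simp only [List.nil_append, List.foldl_cons, List.foldl_nil, sepB_step]
          split_ifs <;> simp
        · by_cases h3 : PySem.Str.startswith l "### " = true
          · simp only [sepA_go, sepB_part, if_neg h1, if_neg h2, if_pos h3]
            have hstep : sepB_fmt [] raw
                ++ [PySem.Str.upper (PySem.Str.strip (PySem.Str.slice l (some 4) none))]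
                = sepB_fmt [] (raw ++ [l]) := by
              rw [sepB_fmt_append raw [l] [], sepB_fmt_singleton, if_pos h3]
            rw [hstep]; exact ih t (raw ++ [l]) secs
          · by_cases h4 : sepB_fmt [] raw = [] ∧ PySem.Str.strip l = ""
            · simp only [sepA_go, sepB_part, if_neg h1, if_neg h2, if_neg h3, if_pos h4]
              have hstep : sepB_fmt [] raw = sepB_fmt [] (raw ++ [l]) := by
                rw [sepB_fmt_append raw [l] [], sepB_fmt_singleton, if_neg h3,
                  if_neg (by simp [h4.1, h4.2])]
              rw [hstep]; exact ih t (raw ++ [l]) secs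
            · simp only [sepA_go, sepB_part, if_neg h1, if_neg h2, if_neg h3, if_neg h4]
              have hcond : sepB_fmt [] raw ≠ [] ∨ PySem.Str.strip l ≠ "" := by
                rcases not_and_or.mp h4 with h | h
                · exact Or.inl h
                · exact Or.inr h
              have hstep : sepB_fmt [] raw ++ [l] = sepB_fmt [] (raw ++ [l]) := by
                rw [sepB_fmt_append raw [l] [], sepB_fmt_singleton, if_neg h3, if_pos hcond]
              rw [hstep]; exact ih t (raw ++ [l]) secs

-- ===== VERDICT (by name: the statement is the Claim_ definition above) =====
theorem separar_documentacion_en_pestanas_py_spec : Claim_equal_separar_documentacion_en_pestanas_py := by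
  intro texto _
  unfold Spec_separar_documentacion_en_pestanas_py
  unfold separar_documentacion_en_pestanas_py separar_documentacion_en_pestanas_py_alt
  have h := sepA_go_eq (PySem.Str.splitlines texto) "General" [] []
  simp only [sepB_fmt, List.nil_append] at h
  rw [h]
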